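-- pv_equiv track=rewrite | github.com/jmh0036/Codility | Exercises/BitwiseOperations/CountConformingBitmasks.py | solution
-- ===== SOURCE A (Python) =====
-- def LeadingZeroes(BinaryNumber, DesiredLength):
--     return [0] * (DesiredLength - len(BinaryNumber)) + [int(i) for i in BinaryNumber]
--
-- def CountConformal(BinaryNumber):
--     return 2**BinaryNumber.count(0)
--
-- def DomOnes(ListOfBinaries):
--     WhereOnes = [0] * 30
--     for i in range(30):
--         for BinInt in ListOfBinaries:
--             if BinInt[i] == 1:
--                 WhereOnes[i] = 1
--     return WhereOnes
--
-- def solution(A, B, C):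
--     BinA = LeadingZeroes([int(i) for i in bin(A)[2:]],30)
--     BinB = LeadingZeroes([int(i) for i in bin(B)[2:]],30)
--     BinC = LeadingZeroes([int(i) for i in bin(C)[2:]],30)
--     ConformToA = CountConformal(BinA)
--     ConformToB = CountConformal(BinB)
--     ConformToC = CountConformal(BinC)
--
--     ConformToAandB = CountConformal(DomOnes([BinA,BinB]))
--     ConformToAandC = CountConformal(DomOnes([BinA,BinC]))
--     ConformToBandC = CountConformal(DomOnes([BinB,BinC]))
--
--     ConformToABandC = CountConformal(DomOnes([BinA,BinB,BinC]))
--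
--     return ConformToA+ConformToB+ConformToC-ConformToAandB-ConformToAandC-ConformToBandC + ConformToABandC
-- ===== SOURCE B (Python) =====
-- def solution(A, B, C):
--     # Per-bit dynamic programming over the 30 bit positions: the state records
--     # which of A, B, C the mask built so far still conforms to; masks whose
--     # final state is nonempty are counted.
--     dp = [0] * 8
--     dp[7] = 1
--     for i in range(30):
--         ndp = [0] * 8
--         for state in range(1, 8):
--             cnt = dp[state]
--             ndp[state] += cnt         # put a 1 at position i: every number survives
--             ns = state                # put a 0: numbers with bit i set are violated
--             if (A >> i) & 1:
--                 ns &= ~1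
--             if (B >> i) & 1:
--                 ns &= ~2
--             if (C >> i) & 1:
--                 ns &= ~4
--             if ns:
--                 ndp[ns] += cnt
--         dp = ndp
--     return sum(dp[1:])
-- ===== Notes on version B (the rewrite author's own statement) =====
-- stated objective: alternative
-- what changed: Replaces A's inclusion-exclusion over seven hand-built 30-element bit lists by a per-bit dynamic program: a DP table indexed by the subset of {A,B,C} the mask built so far still conforms to, updated once per bit position, whose surviving counts are summed at the end.
-- outside the precondition, e.g. on solution(1073741824, 0, 0): A returns 1610612736, B returns 1073741824; on solution(-1, 0, 0): A raises ValueError, B returns 1073741824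
import Mathlib
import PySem

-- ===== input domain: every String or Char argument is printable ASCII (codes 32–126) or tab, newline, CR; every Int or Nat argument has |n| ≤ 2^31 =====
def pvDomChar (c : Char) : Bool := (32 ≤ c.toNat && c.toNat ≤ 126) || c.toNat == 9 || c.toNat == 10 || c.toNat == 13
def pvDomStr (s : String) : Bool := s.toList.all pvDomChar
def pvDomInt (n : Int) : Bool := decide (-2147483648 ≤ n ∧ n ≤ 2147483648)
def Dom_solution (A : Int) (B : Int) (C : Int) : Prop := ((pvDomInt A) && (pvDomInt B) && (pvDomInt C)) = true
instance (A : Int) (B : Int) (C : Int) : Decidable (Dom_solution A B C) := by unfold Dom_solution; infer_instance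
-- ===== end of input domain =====

-- B replaces A's inclusion-exclusion over hand-built 30-element bit lists by a per-bit
-- dynamic program (state = which of A, B, C the mask built so far still conforms to);
-- a genuinely different algorithm of similar O(1) cost (alternative, not faster).

-- ===== PORT A =====

-- digits of bin(n)[2:] for n > 0, most-significant first (A builds this via Python's bin)
def binDigits : Nat → List Int
  | 0 => []
  | (n+1) => binDigits ((n+1)/2) ++ [(((n+1) % 2 : Nat) : Int)]
decreasing_by exact Nat.div_lt_self (Nat.succ_pos n) one_lt_two

-- [int(i) for i in bin(A)[2:]] for A ≥ 0 (bin(0)[2:] = "0")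
def pyBinList (n : Int) : List Int := if n.toNat = 0 then [0] else binDigits n.toNat

-- LeadingZeroes: [0]*(DesiredLength - len(b)) + b  (Python's [0]*negative = [], like Nat sub)
def leadingZeroes (b : List Int) (d : Nat) : List Int := List.replicate (d - b.length) 0 ++ b

-- CountConformal: 2**b.count(0)
def countConformal (b : List Int) : Int := (2:Int) ^ (b.count 0)

-- DomOnes: for i in range(30): for BinInt in L: if BinInt[i] == 1: W[i] = 1
def domOnes (L : List (List Int)) : List Int :=
  (PySem.List.pyRange 0 30 1).foldl
    (fun W i => L.foldl (fun W' bi => if PySem.List.pyGetD bi i 0 = 1 then W'.set i.toNat 1 else W') W)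
    (List.replicate 30 0)

def solution (A : Int) (B : Int) (C : Int) : Int :=
  let binA := leadingZeroes (pyBinList A) 30
  let binB := leadingZeroes (pyBinList B) 30
  let binC := leadingZeroes (pyBinList C) 30
  countConformal binA + countConformal binB + countConformal binC
    - countConformal (domOnes [binA, binB])
    - countConformal (domOnes [binA, binC])
    - countConformal (domOnes [binB, binC])
    + countConformal (domOnes [binA, binB, binC])

-- ===== PORT B =====

-- body of Source B's outer loop: one bit position i; inner loop over states 1..7
-- (Python truthiness of '(A >> i) & 1' is 'value ≠ 0')
def bodyB (A B C : Int) (dp : List Int) (i : Int) : List Int :=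
  (PySem.List.pyRange 1 8 1).foldl (fun ndp state =>
    let cnt := PySem.List.pyGetD dp state 0
    let ndp1 := ndp.set state.toNat (PySem.List.pyGetD ndp state 0 + cnt)
    let ns1 := if PySem.Int.band (A >>> i.toNat) 1 ≠ 0 then PySem.Int.band state (Int.not 1) else state
    let ns2 := if PySem.Int.band (B >>> i.toNat) 1 ≠ 0 then PySem.Int.band ns1 (Int.not 2) else ns1
    let ns3 := if PySem.Int.band (C >>> i.toNat) 1 ≠ 0 then PySem.Int.band ns2 (Int.not 4) else ns2
    if ns3 ≠ 0 then ndp1.set ns3.toNat (PySem.List.pyGetD ndp1 ns3 0 + cnt) else ndp1)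
    (List.replicate 8 0)

def solution_alt (A : Int) (B : Int) (C : Int) : Int :=
  let dp := (PySem.List.pyRange 0 30 1).foldl (bodyB A B C) ((List.replicate 8 0).set 7 1)
  (PySem.List.slice dp (some 1) none).sum

-- ===== PRECONDITION & SPEC =====

-- Pre_ excludes negative inputs, on which A raises ValueError (int('b') on bin's '-0b…'),
-- and inputs ≥ 2^30, outside the task's 30-bit domain, where A returns an accidental value:
-- its bit lists are longer than 30 and DomOnes compares them at misaligned bit positions,
-- so neither A's nor B's value is the specified count there.
def Pre_solution (A : Int) (B : Int) (C : Int) : Prop :=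
  (0 ≤ A ∧ A < 1073741824) ∧ (0 ≤ B ∧ B < 1073741824) ∧ (0 ≤ C ∧ C < 1073741824)
instance (A : Int) (B : Int) (C : Int) : Decidable (Pre_solution A B C) := by
  unfold Pre_solution; infer_instance

def pvWitness_solution : Int × Int × Int := (5, 6, 7)

def Spec_solution (A : Int) (B : Int) (C : Int) (out : Int) : Prop := out = solution_alt A B C
instance (A : Int) (B : Int) (C : Int) (out : Int) : Decidable (Spec_solution A B C out) := by
  unfold Spec_solution; infer_instance

-- ===== CLAIM (what is proved, stated in full; the proofs are below) =====
def Claim_equal_solution : Prop := ∀ (A : Int) (B : Int) (C : Int), Dom_solution A B C → Pre_solution A B C → Spec_solution A B C (solution A B C)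

-- ===== LEMMAS AND PROOFS =====

-- ---------- A-side characterisation: solution = inclusion-exclusion of 2^(30 - popcount) ----------

-- conf x = 2^(30 - popcount x): the value of CountConformal on a 30-bit padded list (proof-side)
def conf (x : Int) : Int := (2:Int) ^ (30 - PySem.Int.bitCount x)

-- i-th binary digit of n (least significant = index 0), as an Int
def bitI (n i : Nat) : Int := ((n / 2^i % 2 : Nat) : Int)

-- the 30-bit list of n, least-significant first (proof-side normal form)
def padRev (n k : Nat) : List Int := (List.range k).map (bitI n)

lemma bitI_succ (n i : Nat) : bitI n (i+1) = bitI (n/2) i := by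
  simp [bitI, pow_succ, Nat.div_div_eq_div_mul]
  ring_nf

lemma bitI_testBit (n i : Nat) : bitI n i = if n.testBit i then 1 else 0 := by
  rw [Nat.testBit_eq_decide_div_mod_eq]
  rcases Nat.mod_two_eq_zero_or_one (n / 2^i) with h | h <;> simp [bitI, h]

lemma padRev_succ (n k : Nat) : padRev n (k+1) = ((n % 2 : Nat) : Int) :: padRev (n/2) k := by
  rw [padRev, List.range_succ_eq_map, List.map_cons, List.map_map]
  refine congrArg₂ _ (by simp [bitI]) ?_
  have h : bitI n ∘ Nat.succ = bitI (n/2) := by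
    funext i; exact bitI_succ n i
  rw [h]; rfl

lemma padRev_zero_left (k : Nat) : padRev 0 k = List.replicate k 0 := by
  simp [padRev, bitI, List.eq_replicate_iff]

lemma padRev_length (n k : Nat) : (padRev n k).length = k := by simp [padRev]

-- A's padded bit list, reversed, is padRev
lemma binDigits_rev (k : Nat) : ∀ n : Nat, 0 < n → n < 2^k →
    (binDigits n).reverse ++ List.replicate (k - (binDigits n).length) 0 = padRev n k := by
  induction k with
  | zero => intro n h1 h2; omega
  | succ k ih =>
    intro n h1 h2
    obtain ⟨m, rfl⟩ := Nat.exists_eq_succ_of_ne_zero (Nat.pos_iff_ne_zero.mp h1)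
    rw [binDigits]
    rw [List.reverse_append, List.reverse_singleton, List.length_append]
    simp only [List.length_singleton, List.cons_append]
    rw [padRev_succ]
    refine congrArg₂ _ rfl ?_
    by_cases h0 : (m+1)/2 = 0
    · rw [h0, binDigits]
      simp [padRev_zero_left]
    · have hlt : (m+1)/2 < 2^k := by
        rw [Nat.div_lt_iff_lt_mul (by norm_num)]
        calc m+1 < 2^(k+1) := h2
        _ = 2^k * 2 := by rw [pow_succ]
      have := ih ((m+1)/2) (Nat.pos_of_ne_zero h0) hlt
      rw [← this]
      refine congrArg₂ _ rfl (congrArg₂ _ (by omega) rfl)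

lemma pad_eq (n k : Nat) (hk : 0 < k) (h : n < 2^k) :
    leadingZeroes (pyBinList (n : Int)) k = (padRev n k).reverse := by
  by_cases h0 : n = 0
  · subst h0
    simp only [pyBinList, Int.toNat_natCast, leadingZeroes, padRev_zero_left,
      List.reverse_replicate]
    rw [show k = (k-1) + 1 by omega, List.replicate_succ']
    simp
  · have hpos : 0 < n := Nat.pos_of_ne_zero h0
    have := binDigits_rev k n hpos h
    rw [pyBinList, Int.toNat_natCast, if_neg h0, leadingZeroes]
    rw [← List.reverse_reverse (List.replicate _ 0 ++ binDigits n)]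
    rw [List.reverse_append, List.reverse_replicate, this]

-- zero-count of the 30-bit list complements popcount
lemma countZ (k : Nat) : ∀ n : Nat, n < 2^k →
    (padRev n k).count 0 + PySem.Int.bitCount (n : Int) = k := by
  induction k with
  | zero =>
    intro n h
    interval_cases n
    simp [padRev]
  | succ k ih =>
    intro n h
    by_cases h0 : n = 0
    · subst h0; simp [padRev_zero_left]
    · have hpos : 0 < n := Nat.pos_of_ne_zero h0
      have hlt : n/2 < 2^k := by
        rw [Nat.div_lt_iff_lt_mul (by norm_num)]
        calc n < 2^(k+1) := h
        _ = 2^k * 2 := by rw [pow_succ]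
      have hbc := PySem.Int.bitCount_natCast hpos
      have hih := ih (n/2) hlt
      rw [padRev_succ, List.count_cons, hbc]
      rcases Nat.mod_two_eq_zero_or_one n with h2 | h2 <;> rw [h2] <;>
        simp only [Nat.cast_zero, Nat.cast_one, show ((0:Int)==0)=true from rfl,
          show ((1:Int)==0)=false from rfl, if_true, Bool.false_eq_true, if_false] <;> omega

lemma count_pad (n : Nat) (h : n < 2^30) :
    (leadingZeroes (pyBinList (n : Int)) 30).count 0 = 30 - PySem.Int.bitCount (n : Int) := by
  rw [pad_eq n 30 (by norm_num) h, List.count_reverse]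
  have := countZ 30 n h
  omega

lemma countConformal_pad (n : Nat) (h : n < 2^30) :
    countConformal (leadingZeroes (pyBinList (n : Int)) 30) = conf (n : Int) := by
  rw [countConformal, conf, count_pad n h]

-- ---- DomOnes ----

-- generic loop shape of DomOnes: it sets exactly the indices where cond holds
lemma foldl_set_getD (cond : Nat → Bool) :
    ∀ (k : Nat) (W : List Int) (j : Nat), k ≤ W.length →
    (((List.range k).foldl (fun W i => if cond i then W.set i 1 else W) W).getD j 0
      = if j < k ∧ cond j then 1 else W.getD j 0)
    ∧ ((List.range k).foldl (fun W i => if cond i then W.set i 1 else W) W).length = W.length := by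
  intro k
  induction k with
  | zero => intro W j _; simp
  | succ k ih =>
    intro W j hk
    have hk' : k ≤ W.length := by omega
    obtain ⟨ihg, ihl⟩ := ih W j hk'
    rw [List.range_succ, List.foldl_append, List.foldl_cons, List.foldl_nil]
    by_cases hc : cond k
    · rw [if_pos hc]
      refine ⟨?_, by rw [List.length_set, ihl]⟩
      by_cases hj : j = k
      · subst hj
        rw [List.getD_eq_getElem _ _ (by rw [List.length_set, ihl]; omega)]
        simp [hc]
      · rw [List.getD_eq_getElem?_getD, List.getElem?_set, if_neg (fun h => hj h.symm)]
        rw [← List.getD_eq_getElem?_getD, ihg]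
        have : (j < k + 1 ∧ cond j = true) ↔ (j < k ∧ cond j = true) := by
          constructor
          · rintro ⟨h1, h2⟩; exact ⟨by omega, h2⟩
          · rintro ⟨h1, h2⟩; exact ⟨by omega, h2⟩
        simp only [this]
    · rw [if_neg hc]
      refine ⟨?_, ihl⟩
      rw [ihg]
      by_cases hj : j = k
      · subst hj; simp [hc]
      · have : (j < k + 1 ∧ cond j = true) ↔ (j < k ∧ cond j = true) := by
          constructor
          · rintro ⟨h1, h2⟩
            refine ⟨?_, h2⟩
            rcases Nat.lt_succ_iff_lt_or_eq.mp h1 with h | h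
            · exact h
            · exact absurd h2 (h ▸ by simp [hc])
          · rintro ⟨h1, h2⟩; exact ⟨by omega, h2⟩
        simp only [this]

-- the two/three inner conditional sets collapse to one conditional set
lemma inner_two (pa pb : List Int) (i : Nat) (W : List Int) :
    ([pa, pb].foldl (fun W' bi => if PySem.List.pyGetD bi ((i:Nat):Int) 0 = 1 then W'.set ((i:Int)).toNat 1 else W') W)
      = if (pa.getD i 0 = 1 ∨ pb.getD i 0 = 1) then W.set i 1 else W := by
  simp only [List.foldl_cons, List.foldl_nil, PySem.List.pyGetD_natCast, Int.toNat_natCast,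
    List.getD_eq_getElem?_getD]
  by_cases ha : pa[i]?.getD 0 = 1 <;> by_cases hb : pb[i]?.getD 0 = 1 <;>
    simp [ha, hb, List.set_set]

lemma inner_three (pa pb pc : List Int) (i : Nat) (W : List Int) :
    ([pa, pb, pc].foldl (fun W' bi => if PySem.List.pyGetD bi ((i:Nat):Int) 0 = 1 then W'.set ((i:Int)).toNat 1 else W') W)
      = if (pa.getD i 0 = 1 ∨ pb.getD i 0 = 1 ∨ pc.getD i 0 = 1) then W.set i 1 else W := by
  simp only [List.foldl_cons, List.foldl_nil, PySem.List.pyGetD_natCast, Int.toNat_natCast,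
    List.getD_eq_getElem?_getD]
  by_cases ha : pa[i]?.getD 0 = 1 <;> by_cases hb : pb[i]?.getD 0 = 1 <;>
    by_cases hc : pc[i]?.getD 0 = 1 <;> simp [ha, hb, hc, List.set_set]


lemma domOnes_eq_fold (L : List (List Int)) :
    domOnes L = (List.range 30).foldl
      (fun W (i : Nat) => L.foldl (fun W' bi => if PySem.List.pyGetD bi ((i : Nat) : Int) 0 = 1 then W'.set (((i : Nat) : Int)).toNat 1 else W') W)
      (List.replicate 30 0) := by
  rw [domOnes, PySem.List.pyRange_one]
  rw [List.foldl_map]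
  simp only [Int.sub_zero, Int.zero_add, show ((30:Int)).toNat = 30 from rfl]

lemma pad_getD (n : Nat) (h : n < 2^30) (j : Nat) (hj : j < 30) :
    (leadingZeroes (pyBinList (n : Int)) 30).getD j 0 = bitI n (29 - j) := by
  rw [pad_eq n 30 (by norm_num) h]
  rw [List.getD_eq_getElem?_getD, List.getElem?_reverse (by rw [padRev_length]; omega)]
  rw [padRev_length, padRev, List.getElem?_map]
  rw [List.getElem?_range (show 30 - 1 - j < 30 by omega)]
  simp only [Option.map_some, Option.getD_some]

lemma pad_length (n : Nat) (h : n < 2^30) :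
    (leadingZeroes (pyBinList (n : Int)) 30).length = 30 := by
  rw [pad_eq n 30 (by norm_num) h, List.length_reverse, padRev_length]

lemma domOnes_two (a b : Nat) (ha : a < 2^30) (hb : b < 2^30) :
    domOnes [leadingZeroes (pyBinList (a : Int)) 30, leadingZeroes (pyBinList (b : Int)) 30]
      = leadingZeroes (pyBinList ((a ||| b : Nat) : Int)) 30 := by
  have hor : a ||| b < 2^30 := Nat.or_lt_two_pow ha hb
  rw [domOnes_eq_fold]
  simp only [inner_two]
  have hcongr : ∀ (W : List Int),
      (List.range 30).foldl
        (fun W i => if (leadingZeroes (pyBinList (a : Int)) 30).getD i 0 = 1 ∨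
                       (leadingZeroes (pyBinList (b : Int)) 30).getD i 0 = 1
                    then W.set i 1 else W) W
      = (List.range 30).foldl
        (fun W i => if (fun i => decide ((leadingZeroes (pyBinList (a : Int)) 30).getD i 0 = 1 ∨
                       (leadingZeroes (pyBinList (b : Int)) 30).getD i 0 = 1)) i = true
                    then W.set i 1 else W) W := by
    intro W; simp only [decide_eq_true_eq]
  rw [hcongr]
  apply List.ext_getElem
  · rw [(foldl_set_getD _ 30 (List.replicate 30 0) 0 (by simp)).2, pad_length _ hor]
    simp
  · intro j h1 h2
    have hj : j < 30 := by
      have := h1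
      rw [(foldl_set_getD _ 30 (List.replicate 30 0) 0 (by simp)).2] at this
      simpa using this
    rw [← List.getD_eq_getElem (((List.range 30).foldl _ _)) 0 h1,
        ← List.getD_eq_getElem _ 0 h2]
    rw [(foldl_set_getD _ 30 (List.replicate 30 0) j (by simp)).1]
    simp only [decide_eq_true_eq]
    rw [pad_getD _ hor j hj, pad_getD a ha j hj, pad_getD b hb j hj]
    rw [bitI_testBit, bitI_testBit, bitI_testBit, Nat.testBit_or]
    rw [List.getD_replicate (0:Int) hj]
    by_cases hta : a.testBit (29-j) <;> by_cases htb : b.testBit (29-j) <;>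
      simp [hta, htb, hj]

lemma domOnes_three (a b c : Nat) (ha : a < 2^30) (hb : b < 2^30) (hc : c < 2^30) :
    domOnes [leadingZeroes (pyBinList (a : Int)) 30, leadingZeroes (pyBinList (b : Int)) 30,
             leadingZeroes (pyBinList (c : Int)) 30]
      = leadingZeroes (pyBinList ((a ||| b ||| c : Nat) : Int)) 30 := by
  have hor : a ||| b ||| c < 2^30 := Nat.or_lt_two_pow (Nat.or_lt_two_pow ha hb) hc
  rw [domOnes_eq_fold]
  simp only [inner_three]
  have hcongr : ∀ (W : List Int),
      (List.range 30).foldl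
        (fun W i => if (leadingZeroes (pyBinList (a : Int)) 30).getD i 0 = 1 ∨
                       (leadingZeroes (pyBinList (b : Int)) 30).getD i 0 = 1 ∨
                       (leadingZeroes (pyBinList (c : Int)) 30).getD i 0 = 1
                    then W.set i 1 else W) W
      = (List.range 30).foldl
        (fun W i => if (fun i => decide ((leadingZeroes (pyBinList (a : Int)) 30).getD i 0 = 1 ∨
                       (leadingZeroes (pyBinList (b : Int)) 30).getD i 0 = 1 ∨
                       (leadingZeroes (pyBinList (c : Int)) 30).getD i 0 = 1)) i = true
                    then W.set i 1 else W) W := by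
    intro W; simp only [decide_eq_true_eq]
  rw [hcongr]
  apply List.ext_getElem
  · rw [(foldl_set_getD _ 30 (List.replicate 30 0) 0 (by simp)).2, pad_length _ hor]
    simp
  · intro j h1 h2
    have hj : j < 30 := by
      have := h1
      rw [(foldl_set_getD _ 30 (List.replicate 30 0) 0 (by simp)).2] at this
      simpa using this
    rw [← List.getD_eq_getElem (((List.range 30).foldl _ _)) 0 h1,
        ← List.getD_eq_getElem _ 0 h2]
    rw [(foldl_set_getD _ 30 (List.replicate 30 0) j (by simp)).1]
    simp only [decide_eq_true_eq]
    rw [pad_getD _ hor j hj, pad_getD a ha j hj, pad_getD b hb j hj, pad_getD c hc j hj]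
    rw [bitI_testBit, bitI_testBit, bitI_testBit, bitI_testBit, Nat.testBit_or, Nat.testBit_or]
    rw [List.getD_replicate (0:Int) hj]
    by_cases hta : a.testBit (29-j) <;> by_cases htb : b.testBit (29-j) <;>
      by_cases htc : c.testBit (29-j) <;> simp [hta, htb, htc, hj]

-- ---------- B-side: the per-bit DP satisfies the superset-sum invariant ----------

-- number of zero bits of n among the low i bit positions
def zc (n i : Nat) : Nat := ((List.range i).filter (fun k => !n.testBit k)).length

lemma zc_succ (n i : Nat) : zc n (i+1) = zc n i + (if n.testBit i then 0 else 1) := by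
  rw [zc, List.range_succ, List.filter_append]
  cases h : n.testBit i <;> simp [zc, h]

lemma zc_thirty (n : Nat) (h : n < 2^30) : zc n 30 = 30 - PySem.Int.bitCount (n : Int) := by
  have hcz := countZ 30 n h
  have : (padRev n 30).count 0 = zc n 30 := by
    rw [padRev, List.count_eq_countP, List.countP_map, zc, ← List.countP_eq_length_filter]
    apply List.countP_congr
    intro k _
    rw [Function.comp_apply, bitI_testBit]
    cases hk : n.testBit k <;> simp
  omega

-- the bit-i condition in bodyB is testBit
lemma shr_natCast (a k : Nat) : ((a:Int) >>> k) = ((a >>> k : Nat) : Int) := Int.mem_toNat?.mp rfl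

lemma cond_eq (n k : Nat) : (PySem.Int.band ((n:Int) >>> k) 1 ≠ 0) = (n.testBit k = true) := by
  rw [shr_natCast, show ((1:Int)) = ((1:Nat):Int) from rfl, PySem.Int.band_natCast]
  simp [Nat.testBit, Nat.and_comm]
  exact_mod_cast Iff.rfl

-- bodyB with the conditions replaced by the three bits (proof-side twin of bodyB)
def stepB (x y z : Bool) (dp : List Int) : List Int :=
  (PySem.List.pyRange 1 8 1).foldl (fun ndp state =>
    let cnt := PySem.List.pyGetD dp state 0
    let ndp1 := ndp.set state.toNat (PySem.List.pyGetD ndp state 0 + cnt)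
    let ns1 := if x then PySem.Int.band state (Int.not 1) else state
    let ns2 := if y then PySem.Int.band ns1 (Int.not 2) else ns1
    let ns3 := if z then PySem.Int.band ns2 (Int.not 4) else ns2
    if ns3 ≠ 0 then ndp1.set ns3.toNat (PySem.List.pyGetD ndp1 ns3 0 + cnt) else ndp1)
    (List.replicate 8 0)

lemma bodyB_eq (a b c : Nat) (k : Nat) (dp : List Int) :
    bodyB (a:Int) (b:Int) (c:Int) dp (k:Int) = stepB (a.testBit k) (b.testBit k) (c.testBit k) dp := by
  unfold bodyB stepB
  simp only [Int.toNat_natCast, cond_eq]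

set_option maxHeartbeats 2000000 in
lemma stepB_fff (d1 d2 d3 d4 d5 d6 d7 : Int) :
    stepB false false false [0,d1,d2,d3,d4,d5,d6,d7] =
      [0, 0+d1+d1, 0+d2+d2, 0+d3+d3, 0+d4+d4, 0+d5+d5, 0+d6+d6, 0+d7+d7] := rfl

set_option maxHeartbeats 2000000 in
lemma stepB_tff (d1 d2 d3 d4 d5 d6 d7 : Int) :
    stepB true false false [0,d1,d2,d3,d4,d5,d6,d7] =
      [0, 0+d1, 0+d2+d2+d3, 0+d3, 0+d4+d4+d5, 0+d5, 0+d6+d6+d7, 0+d7] := rfl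

set_option maxHeartbeats 2000000 in
lemma stepB_ftf (d1 d2 d3 d4 d5 d6 d7 : Int) :
    stepB false true false [0,d1,d2,d3,d4,d5,d6,d7] =
      [0, 0+d1+d1+d3, 0+d2, 0+d3, 0+d4+d4+d6, 0+d5+d5+d7, 0+d6, 0+d7] := rfl

set_option maxHeartbeats 2000000 in
lemma stepB_ttf (d1 d2 d3 d4 d5 d6 d7 : Int) :
    stepB true true false [0,d1,d2,d3,d4,d5,d6,d7] =
      [0, 0+d1, 0+d2, 0+d3, 0+d4+d4+d5+d6+d7, 0+d5, 0+d6, 0+d7] := rfl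

set_option maxHeartbeats 2000000 in
lemma stepB_fft (d1 d2 d3 d4 d5 d6 d7 : Int) :
    stepB false false true [0,d1,d2,d3,d4,d5,d6,d7] =
      [0, 0+d1+d1+d5, 0+d2+d2+d6, 0+d3+d3+d7, 0+d4, 0+d5, 0+d6, 0+d7] := rfl

set_option maxHeartbeats 2000000 in
lemma stepB_tft (d1 d2 d3 d4 d5 d6 d7 : Int) :
    stepB true false true [0,d1,d2,d3,d4,d5,d6,d7] =
      [0, 0+d1, 0+d2+d2+d3+d6+d7, 0+d3, 0+d4, 0+d5, 0+d6, 0+d7] := rfl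

set_option maxHeartbeats 2000000 in
lemma stepB_ftt (d1 d2 d3 d4 d5 d6 d7 : Int) :
    stepB false true true [0,d1,d2,d3,d4,d5,d6,d7] =
      [0, 0+d1+d1+d3+d5+d7, 0+d2, 0+d3, 0+d4, 0+d5, 0+d6, 0+d7] := rfl

set_option maxHeartbeats 2000000 in
lemma stepB_ttt (d1 d2 d3 d4 d5 d6 d7 : Int) :
    stepB true true true [0,d1,d2,d3,d4,d5,d6,d7] =
      [0, 0+d1, 0+d2, 0+d3, 0+d4, 0+d5, 0+d6, 0+d7] := rfl

-- invariant: after i bit positions the superset-sums of the DP are 2^(zeros so far)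
set_option maxHeartbeats 4000000 in
lemma loop_inv (a b c : Nat) (i : Nat) :
    ∃ d1 d2 d3 d4 d5 d6 d7 : Int,
      (List.range i).foldl (fun dp (k : Nat) => bodyB (a:Int) (b:Int) (c:Int) dp (k:Int))
        ((List.replicate 8 0).set 7 1) = [0,d1,d2,d3,d4,d5,d6,d7] ∧
      d1 + d3 + d5 + d7 = ((2^(zc a i) : Nat) : Int) ∧
      d2 + d3 + d6 + d7 = ((2^(zc b i) : Nat) : Int) ∧
      d4 + d5 + d6 + d7 = ((2^(zc c i) : Nat) : Int) ∧
      d3 + d7 = ((2^(zc (a ||| b) i) : Nat) : Int) ∧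
      d5 + d7 = ((2^(zc (a ||| c) i) : Nat) : Int) ∧
      d6 + d7 = ((2^(zc (b ||| c) i) : Nat) : Int) ∧
      d7 = ((2^(zc (a ||| b ||| c) i) : Nat) : Int) := by
  induction i with
  | zero =>
    refine ⟨0, 0, 0, 0, 0, 0, 1, rfl, ?_, ?_, ?_, ?_, ?_, ?_, ?_⟩ <;>
      simp [zc]
  | succ i ih =>
    obtain ⟨d1, d2, d3, d4, d5, d6, d7, hdp, h1, h2, h3, h4, h5, h6, h7⟩ := ih
    rw [List.range_succ, List.foldl_append, List.foldl_cons, List.foldl_nil, hdp, bodyB_eq]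
    have hza := zc_succ a i
    have hzb := zc_succ b i
    have hzc := zc_succ c i
    have hzab := zc_succ (a ||| b) i
    have hzac := zc_succ (a ||| c) i
    have hzbc := zc_succ (b ||| c) i
    have hzabc := zc_succ (a ||| b ||| c) i
    rw [Nat.testBit_or] at hzab hzac hzbc hzabc
    rw [Nat.testBit_or] at hzabc
    cases hx : a.testBit i <;> cases hy : b.testBit i <;> cases hz : c.testBit i <;>
      simp only [hx, hy, hz, Bool.or_false, Bool.or_true,
        if_true, if_false, Bool.false_eq_true, Nat.add_zero] at hza hzb hzc hzab hzac hzbc hzabc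
    · exact ⟨0+d1+d1, 0+d2+d2, 0+d3+d3, 0+d4+d4, 0+d5+d5, 0+d6+d6, 0+d7+d7,
        stepB_fff d1 d2 d3 d4 d5 d6 d7,
        by rw [hza, pow_succ]; push_cast at h1 ⊢; linarith,
        by rw [hzb, pow_succ]; push_cast at h2 ⊢; linarith,
        by rw [hzc, pow_succ]; push_cast at h3 ⊢; linarith,
        by rw [hzab, pow_succ]; push_cast at h4 ⊢; linarith,
        by rw [hzac, pow_succ]; push_cast at h5 ⊢; linarith,
        by rw [hzbc, pow_succ]; push_cast at h6 ⊢; linarith,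
        by rw [hzabc, pow_succ]; push_cast at h7 ⊢; linarith⟩
    · exact ⟨0+d1+d1+d5, 0+d2+d2+d6, 0+d3+d3+d7, 0+d4, 0+d5, 0+d6, 0+d7,
        stepB_fft d1 d2 d3 d4 d5 d6 d7,
        by rw [hza, pow_succ]; push_cast at h1 ⊢; linarith,
        by rw [hzb, pow_succ]; push_cast at h2 ⊢; linarith,
        by rw [hzc]; push_cast at h3 ⊢; linarith,
        by rw [hzab, pow_succ]; push_cast at h4 ⊢; linarith,
        by rw [hzac]; push_cast at h5 ⊢; linarith,
        by rw [hzbc]; push_cast at h6 ⊢; linarith,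
        by rw [hzabc]; push_cast at h7 ⊢; linarith⟩
    · exact ⟨0+d1+d1+d3, 0+d2, 0+d3, 0+d4+d4+d6, 0+d5+d5+d7, 0+d6, 0+d7,
        stepB_ftf d1 d2 d3 d4 d5 d6 d7,
        by rw [hza, pow_succ]; push_cast at h1 ⊢; linarith,
        by rw [hzb]; push_cast at h2 ⊢; linarith,
        by rw [hzc, pow_succ]; push_cast at h3 ⊢; linarith,
        by rw [hzab]; push_cast at h4 ⊢; linarith,
        by rw [hzac, pow_succ]; push_cast at h5 ⊢; linarith,
        by rw [hzbc]; push_cast at h6 ⊢; linarith,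
        by rw [hzabc]; push_cast at h7 ⊢; linarith⟩
    · exact ⟨0+d1+d1+d3+d5+d7, 0+d2, 0+d3, 0+d4, 0+d5, 0+d6, 0+d7,
        stepB_ftt d1 d2 d3 d4 d5 d6 d7,
        by rw [hza, pow_succ]; push_cast at h1 ⊢; linarith,
        by rw [hzb]; push_cast at h2 ⊢; linarith,
        by rw [hzc]; push_cast at h3 ⊢; linarith,
        by rw [hzab]; push_cast at h4 ⊢; linarith,
        by rw [hzac]; push_cast at h5 ⊢; linarith,
        by rw [hzbc]; push_cast at h6 ⊢; linarith,
        by rw [hzabc]; push_cast at h7 ⊢; linarith⟩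
    · exact ⟨0+d1, 0+d2+d2+d3, 0+d3, 0+d4+d4+d5, 0+d5, 0+d6+d6+d7, 0+d7,
        stepB_tff d1 d2 d3 d4 d5 d6 d7,
        by rw [hza]; push_cast at h1 ⊢; linarith,
        by rw [hzb, pow_succ]; push_cast at h2 ⊢; linarith,
        by rw [hzc, pow_succ]; push_cast at h3 ⊢; linarith,
        by rw [hzab]; push_cast at h4 ⊢; linarith,
        by rw [hzac]; push_cast at h5 ⊢; linarith,
        by rw [hzbc, pow_succ]; push_cast at h6 ⊢; linarith,
        by rw [hzabc]; push_cast at h7 ⊢; linarith⟩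
    · exact ⟨0+d1, 0+d2+d2+d3+d6+d7, 0+d3, 0+d4, 0+d5, 0+d6, 0+d7,
        stepB_tft d1 d2 d3 d4 d5 d6 d7,
        by rw [hza]; push_cast at h1 ⊢; linarith,
        by rw [hzb, pow_succ]; push_cast at h2 ⊢; linarith,
        by rw [hzc]; push_cast at h3 ⊢; linarith,
        by rw [hzab]; push_cast at h4 ⊢; linarith,
        by rw [hzac]; push_cast at h5 ⊢; linarith,
        by rw [hzbc]; push_cast at h6 ⊢; linarith,
        by rw [hzabc]; push_cast at h7 ⊢; linarith⟩
    · exact ⟨0+d1, 0+d2, 0+d3, 0+d4+d4+d5+d6+d7, 0+d5, 0+d6, 0+d7,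
        stepB_ttf d1 d2 d3 d4 d5 d6 d7,
        by rw [hza]; push_cast at h1 ⊢; linarith,
        by rw [hzb]; push_cast at h2 ⊢; linarith,
        by rw [hzc, pow_succ]; push_cast at h3 ⊢; linarith,
        by rw [hzab]; push_cast at h4 ⊢; linarith,
        by rw [hzac]; push_cast at h5 ⊢; linarith,
        by rw [hzbc]; push_cast at h6 ⊢; linarith,
        by rw [hzabc]; push_cast at h7 ⊢; linarith⟩
    · exact ⟨0+d1, 0+d2, 0+d3, 0+d4, 0+d5, 0+d6, 0+d7,
        stepB_ttt d1 d2 d3 d4 d5 d6 d7,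
        by rw [hza]; push_cast at h1 ⊢; linarith,
        by rw [hzb]; push_cast at h2 ⊢; linarith,
        by rw [hzc]; push_cast at h3 ⊢; linarith,
        by rw [hzab]; push_cast at h4 ⊢; linarith,
        by rw [hzac]; push_cast at h5 ⊢; linarith,
        by rw [hzbc]; push_cast at h6 ⊢; linarith,
        by rw [hzabc]; push_cast at h7 ⊢; linarith⟩

-- the outer fold over pyRange 0 30 1 is the fold over List.range 30
lemma fold_pyRange_eq (f : List Int → Int → List Int) (init : List Int) :
    (PySem.List.pyRange 0 30 1).foldl f init
      = (List.range 30).foldl (fun s (k : Nat) => f s (k:Int)) init := by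
  rw [PySem.List.pyRange_one, List.foldl_map]
  simp only [zero_add, Int.sub_zero]
  rfl

lemma cast_pow_conf (n : Nat) (h : n < 2^30) : ((2^(zc n 30) : Nat) : Int) = conf (n : Int) := by
  rw [zc_thirty n h, conf]
  push_cast
  rfl

-- ===== VERDICT (by name: the statement is the Claim_ definition above) =====
theorem solution_spec : Claim_equal_solution := by
  intro A B C _ hPre
  unfold Spec_solution
  obtain ⟨⟨hA0, hA⟩, ⟨hB0, hB⟩, ⟨hC0, hC⟩⟩ := hPre
  obtain ⟨a, rfl⟩ := Int.eq_ofNat_of_zero_le hA0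
  obtain ⟨b, rfl⟩ := Int.eq_ofNat_of_zero_le hB0
  obtain ⟨c, rfl⟩ := Int.eq_ofNat_of_zero_le hC0
  have ha : a < 2^30 := by exact_mod_cast hA
  have hb : b < 2^30 := by exact_mod_cast hB
  have hc : c < 2^30 := by exact_mod_cast hC
  have hab : a ||| b < 2^30 := Nat.or_lt_two_pow ha hb
  have hac : a ||| c < 2^30 := Nat.or_lt_two_pow ha hc
  have hbc : b ||| c < 2^30 := Nat.or_lt_two_pow hb hc
  have habc : a ||| b ||| c < 2^30 := Nat.or_lt_two_pow hab hc
  -- A's side: inclusion-exclusion of conf over bitwise ORs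
  rw [solution]
  rw [domOnes_two a b ha hb, domOnes_two a c ha hc, domOnes_two b c hb hc,
      domOnes_three a b c ha hb hc]
  rw [countConformal_pad a ha, countConformal_pad b hb, countConformal_pad c hc,
      countConformal_pad _ hab, countConformal_pad _ hac, countConformal_pad _ hbc,
      countConformal_pad _ habc]
  -- B's side: the DP invariant at i = 30
  obtain ⟨d1, d2, d3, d4, d5, d6, d7, hdp, h1, h2, h3, h4, h5, h6, h7⟩ := loop_inv a b c 30
  have hsl : PySem.List.slice [0,d1,d2,d3,d4,d5,d6,d7] (some 1) none = [d1,d2,d3,d4,d5,d6,d7] := rfl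
  rw [solution_alt, fold_pyRange_eq, hdp, hsl]
  rw [cast_pow_conf a ha] at h1
  rw [cast_pow_conf b hb] at h2
  rw [cast_pow_conf c hc] at h3
  rw [cast_pow_conf _ hab] at h4
  rw [cast_pow_conf _ hac] at h5
  rw [cast_pow_conf _ hbc] at h6
  rw [cast_pow_conf _ habc] at h7
  simp only [List.sum_cons, List.sum_nil]
  linarith
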